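-- pv_equiv track=rewrite | github.com/Nareeek/Codesignal_tasks | classifyStrings.py | classifyStrings
-- ===== SOURCE A (Python) =====
-- def classifyStrings(s):
--     if len(s) == 1:
--         return "good"
--     vowels = "aeiou"
--     v = ""
--     c = ""
--     tmp1 = False
--     tmp2 = False
--
--     for x in (s + "-"):
--         if x in vowels or x == "?":
--             v += x
--         else:
--             if len(v) == 3:
--                 if "?" in v:
--                     tmp1 = True
--                 else:
--                     return "bad"
--             v = ""
--
--     for x in (s + "-"):
--         if (x not in vowels or x == "?") and x != "-":
--             c += x
--         else:
--             if len(c) == 5: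
--                 if "?" in c:
--                     tmp2 = True
--                 else:
--                     return "bad"
--             c = ""
--
--     if (tmp1 and tmp2) == True:
--         return "bad"
--     elif (not tmp1 and tmp2) or (not tmp2 and tmp1):
--         return "mixed"
--     return "good"
-- ===== SOURCE B (Python) =====
-- def classifyStrings(s):
--     # One fused pass over s with integer run counters and '?' flags,
--     # instead of A's two passes that build run strings with a "-" sentinel.
--     if len(s) == 1:
--         return "good"
--     vowels = "aeiou"
--     vlen = 0; vq = False; tmp1 = False
--     clen = 0; cq = False; tmp2 = False
--     for x in s:
--         if x in vowels or x == "?":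
--             vlen += 1
--             vq = vq or x == "?"
--         else:
--             if vlen == 3:
--                 if vq:
--                     tmp1 = True
--                 else:
--                     return "bad"
--             vlen = 0; vq = False
--         if x not in vowels and x != "-":
--             clen += 1
--             cq = cq or x == "?"
--         else:
--             if clen == 5:
--                 if cq:
--                     tmp2 = True
--                 else:
--                     return "bad"
--             clen = 0; cq = False
--     if vlen == 3:
--         if vq:
--             tmp1 = True
--         else:
--             return "bad"
--     if clen == 5:
--         if cq:
--             tmp2 = True
--         else:
--             return "bad"
--     if tmp1 and tmp2:
--         return "bad"
--     if tmp1 != tmp2: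
--         return "mixed"
--     return "good"
-- ===== Notes on version B (the rewrite author's own statement) =====
-- stated objective: alternative
-- what changed: A's two sentinel-terminated passes that each build the current run as a string are fused into one pass over s that keeps only a run-length counter and a wildcard flag per run kind, with the sentinel replaced by explicit end-of-string flushes.
import Mathlib
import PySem

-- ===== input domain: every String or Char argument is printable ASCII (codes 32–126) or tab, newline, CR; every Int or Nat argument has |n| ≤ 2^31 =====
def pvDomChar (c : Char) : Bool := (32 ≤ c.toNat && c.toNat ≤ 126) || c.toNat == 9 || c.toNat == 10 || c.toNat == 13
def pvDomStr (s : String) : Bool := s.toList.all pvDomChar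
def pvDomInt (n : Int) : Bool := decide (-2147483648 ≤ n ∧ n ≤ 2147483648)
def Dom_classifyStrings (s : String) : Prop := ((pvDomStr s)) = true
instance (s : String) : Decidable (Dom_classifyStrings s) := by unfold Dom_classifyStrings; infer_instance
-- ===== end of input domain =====

-- B fuses A's two sentinel-terminated string-building passes into one pass over s
-- keeping only run-length counters and '?' flags (objective: simpler/alternative).

-- ===== PORT A =====
def pvVowels : List Char := ['a', 'e', 'i', 'o', 'u']

-- first loop of A: builds the vowel run v, early "bad" return = none
def pvLoop1 : List Char → List Char → Bool → Option Bool
  | [], _, tmp1 => some tmp1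
  | x :: rest, v, tmp1 =>
    if x ∈ pvVowels ∨ x = '?' then pvLoop1 rest (v ++ [x]) tmp1
    else if v.length = 3 then
      (if '?' ∈ v then pvLoop1 rest [] true else none)
    else pvLoop1 rest [] tmp1

-- second loop of A: builds the consonant run c, early "bad" return = none
def pvLoop2 : List Char → List Char → Bool → Option Bool
  | [], _, tmp2 => some tmp2
  | x :: rest, c, tmp2 =>
    if (x ∉ pvVowels ∨ x = '?') ∧ x ≠ '-' then pvLoop2 rest (c ++ [x]) tmp2
    else if c.length = 5 then
      (if '?' ∈ c then pvLoop2 rest [] true else none)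
    else pvLoop2 rest [] tmp2

def classifyStrings (s : String) : String :=
  if s.toList.length = 1 then "good"
  else
    match pvLoop1 (s.toList ++ ['-']) [] false with
    | none => "bad"
    | some tmp1 =>
      match pvLoop2 (s.toList ++ ['-']) [] false with
      | none => "bad"
      | some tmp2 =>
        if tmp1 && tmp2 then "bad"
        else if (!tmp1 && tmp2) || (!tmp2 && tmp1) then "mixed"
        else "good"

-- ===== PORT B =====
-- B's single loop: state = vowel-run length/'?'-flag/tmp1 and consonant-run
-- length/'?'-flag/tmp2; an early "bad" return = none
def pvLoopB : List Char → Nat → Bool → Bool → Nat → Bool → Bool → Option (Bool × Bool)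
  | [], vlen, vq, t1, clen, cq, t2 =>
    match (if vlen = 3 then (if vq then some true else none) else some t1) with
    | none => none
    | some t1' =>
      match (if clen = 5 then (if cq then some true else none) else some t2) with
      | none => none
      | some t2' => some (t1', t2')
  | x :: rest, vlen, vq, t1, clen, cq, t2 =>
    match (if x ∈ pvVowels ∨ x = '?' then some (vlen + 1, vq || decide (x = '?'), t1)
           else if vlen = 3 then (if vq then some (0, false, true) else none)
           else some (0, false, t1)) with
    | none => none
    | some (vlen', vq', t1') =>
      match (if x ∉ pvVowels ∧ x ≠ '-' then some (clen + 1, cq || decide (x = '?'), t2)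
             else if clen = 5 then (if cq then some (0, false, true) else none)
             else some (0, false, t2)) with
      | none => none
      | some (clen', cq', t2') => pvLoopB rest vlen' vq' t1' clen' cq' t2'

def classifyStrings_alt (s : String) : String :=
  if s.toList.length = 1 then "good"
  else
    match pvLoopB s.toList 0 false false 0 false false with
    | none => "bad"
    | some (t1, t2) =>
      if t1 && t2 then "bad"
      else if t1 != t2 then "mixed"
      else "good"

-- ===== PRECONDITION & SPEC =====
def Spec_classifyStrings (s : String) (out : String) : Prop := out = classifyStrings_alt s
instance (s : String) (out : String) : Decidable (Spec_classifyStrings s out) := by unfold Spec_classifyStrings; infer_instance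

-- ===== CLAIM (what is proved, stated in full; the proofs are below) =====
def Claim_equal_classifyStrings : Prop := ∀ (s : String), Dom_classifyStrings s → Spec_classifyStrings s (classifyStrings s)

-- ===== LEMMAS AND PROOFS =====

-- abstract versions of A's loops: the run string replaced by (length, has-'?')
def pvLoop1' : List Char → Nat → Bool → Bool → Option Bool
  | [], _, _, t => some t
  | x :: rest, n, q, t =>
    if x ∈ pvVowels ∨ x = '?' then pvLoop1' rest (n + 1) (q || decide (x = '?')) t
    else if n = 3 then (if q then pvLoop1' rest 0 false true else none)
    else pvLoop1' rest 0 false t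

def pvLoop2' : List Char → Nat → Bool → Bool → Option Bool
  | [], _, _, t => some t
  | x :: rest, n, q, t =>
    if (x ∉ pvVowels ∨ x = '?') ∧ x ≠ '-' then pvLoop2' rest (n + 1) (q || decide (x = '?')) t
    else if n = 5 then (if q then pvLoop2' rest 0 false true else none)
    else pvLoop2' rest 0 false t

theorem pvLoop1_abs : ∀ (l v : List Char) (t : Bool),
    pvLoop1 l v t = pvLoop1' l v.length (decide ('?' ∈ v)) t
  | [], _, _ => rfl
  | x :: rest, v, t => by
    simp only [pvLoop1, pvLoop1']
    by_cases h1 : x ∈ pvVowels ∨ x = '?'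
    · rw [if_pos h1, if_pos h1, pvLoop1_abs rest (v ++ [x]) t]
      congr 1
      · simp
      · by_cases hm : '?' ∈ v <;> by_cases hx : x = '?' <;>
          simp [hm, hx, List.mem_append, eq_comm]
    · rw [if_neg h1, if_neg h1]
      by_cases h2 : v.length = 3
      · rw [if_pos h2, if_pos h2]
        by_cases h3 : '?' ∈ v
        · rw [if_pos h3, if_pos (by simp [h3])]
          simpa using pvLoop1_abs rest [] true
        · rw [if_neg h3, if_neg (by simp [h3])]
      · rw [if_neg h2, if_neg h2]
        simpa using pvLoop1_abs rest [] t

theorem pvLoop2_abs : ∀ (l c : List Char) (t : Bool),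
    pvLoop2 l c t = pvLoop2' l c.length (decide ('?' ∈ c)) t
  | [], _, _ => rfl
  | x :: rest, c, t => by
    simp only [pvLoop2, pvLoop2']
    by_cases h1 : (x ∉ pvVowels ∨ x = '?') ∧ x ≠ '-'
    · rw [if_pos h1, if_pos h1, pvLoop2_abs rest (c ++ [x]) t]
      congr 1
      · simp
      · by_cases hm : '?' ∈ c <;> by_cases hx : x = '?' <;>
          simp [hm, hx, List.mem_append, eq_comm]
    · rw [if_neg h1, if_neg h1]
      by_cases h2 : c.length = 5
      · rw [if_pos h2, if_pos h2]
        by_cases h3 : '?' ∈ c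
        · rw [if_pos h3, if_pos (by simp [h3])]
          simpa using pvLoop2_abs rest [] true
        · rw [if_neg h3, if_neg (by simp [h3])]
      · rw [if_neg h2, if_neg h2]
        simpa using pvLoop2_abs rest [] t

-- B's fused loop computes the pair of results of A's two (abstract) loops:
-- none (early "bad") exactly when one of them is none
def pvRel (o : Option (Bool × Bool)) (r1 r2 : Option Bool) : Prop :=
  match r1, r2 with
  | some a, some b => o = some (a, b)
  | _, _ => o = none

theorem pvFuse : ∀ (cs : List Char) (vlen : Nat) (vq t1 : Bool) (clen : Nat) (cq t2 : Bool),
    pvRel (pvLoopB cs vlen vq t1 clen cq t2)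
      (pvLoop1' (cs ++ ['-']) vlen vq t1) (pvLoop2' (cs ++ ['-']) clen cq t2)
  | [], vlen, vq, t1, clen, cq, t2 => by
    have h1 : ¬ (('-' : Char) ∈ pvVowels ∨ ('-' : Char) = '?') := by decide
    have h2 : ¬ ((('-' : Char) ∉ pvVowels ∨ ('-' : Char) = '?') ∧ ('-' : Char) ≠ '-') := by decide
    simp only [List.nil_append, pvLoopB, pvLoop1', pvLoop2', if_neg h1, if_neg h2]
    by_cases hv3 : vlen = 3 <;> by_cases hc5 : clen = 5 <;> cases vq <;> cases cq <;>
      simp [pvRel, hv3, hc5]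
  | x :: rest, vlen, vq, t1, clen, cq, t2 => by
    by_cases hq : x = '?'
    · subst hq
      have hv : ('?' : Char) ∈ pvVowels ∨ ('?' : Char) = '?' := by decide
      have hcA : (('?' : Char) ∉ pvVowels ∨ ('?' : Char) = '?') ∧ ('?' : Char) ≠ '-' := by decide
      have hcB : ('?' : Char) ∉ pvVowels ∧ ('?' : Char) ≠ '-' := by decide
      simp only [pvLoopB, pvLoop1', pvLoop2', List.cons_append, if_pos hcB]
      exact pvFuse rest (vlen + 1) (vq || decide (('?' : Char) = '?')) t1
        (clen + 1) (cq || decide (('?' : Char) = '?')) t2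
    · by_cases hv : x ∈ pvVowels
      · -- x is a real vowel: vowel run extends, consonant run flushes
        have hvo : x ∈ pvVowels ∨ x = '?' := Or.inl hv
        have hcA : ¬ ((x ∉ pvVowels ∨ x = '?') ∧ x ≠ '-') := by
          intro h; rcases h.1 with h' | h' <;> [exact h' hv; exact hq h']
        have hcB : ¬ (x ∉ pvVowels ∧ x ≠ '-') := fun h => h.1 hv
        simp only [pvLoopB, pvLoop1', pvLoop2', List.cons_append, if_pos hvo, if_neg hcA, if_neg hcB]
        by_cases hc5 : clen = 5
        · rw [if_pos hc5, if_pos hc5]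
          cases cq with
          | false =>
            rw [if_neg (show ¬(false = true) by decide), if_neg (show ¬(false = true) by decide)]
            unfold pvRel
            cases pvLoop1' (rest ++ ['-']) (vlen + 1) (vq || decide (x = '?')) t1 <;> rfl
          | true =>
            rw [if_pos rfl, if_pos rfl]
            exact pvFuse rest (vlen + 1) (vq || decide (x = '?')) t1 0 false true
        · rw [if_neg hc5, if_neg hc5]
          exact pvFuse rest (vlen + 1) (vq || decide (x = '?')) t1 0 false t2
      · by_cases hd : x = '-'
        · -- x = '-': both runs flush
          subst hd
          have hvo : ¬ (('-' : Char) ∈ pvVowels ∨ ('-' : Char) = '?') := by decide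
          have hcA : ¬ ((('-' : Char) ∉ pvVowels ∨ ('-' : Char) = '?') ∧ ('-' : Char) ≠ '-') := by decide
          have hcB : ¬ (('-' : Char) ∉ pvVowels ∧ ('-' : Char) ≠ '-') := by decide
          simp only [pvLoopB, pvLoop1', pvLoop2', List.cons_append, if_neg hvo, if_neg hcA, if_neg hcB]
          by_cases hv3 : vlen = 3
          · rw [if_pos hv3, if_pos hv3]
            cases vq with
            | false =>
              rw [if_neg (show ¬(false = true) by decide), if_neg (show ¬(false = true) by decide)]
              unfold pvRel
              rfl
            | true =>
              rw [if_pos rfl, if_pos rfl]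
              by_cases hc5 : clen = 5
              · rw [if_pos hc5, if_pos hc5]
                cases cq with
                | false =>
                  rw [if_neg (show ¬(false = true) by decide), if_neg (show ¬(false = true) by decide)]
                  unfold pvRel
                  cases pvLoop1' (rest ++ ['-']) 0 false true <;> rfl
                | true =>
                  rw [if_pos rfl, if_pos rfl]
                  exact pvFuse rest 0 false true 0 false true
              · rw [if_neg hc5, if_neg hc5]
                exact pvFuse rest 0 false true 0 false t2
          · rw [if_neg hv3, if_neg hv3]
            by_cases hc5 : clen = 5
            · rw [if_pos hc5, if_pos hc5]
              cases cq with
              | false =>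
                rw [if_neg (show ¬(false = true) by decide), if_neg (show ¬(false = true) by decide)]
                unfold pvRel
                cases pvLoop1' (rest ++ ['-']) 0 false t1 <;> rfl
              | true =>
                rw [if_pos rfl, if_pos rfl]
                exact pvFuse rest 0 false t1 0 false true
            · rw [if_neg hc5, if_neg hc5]
              exact pvFuse rest 0 false t1 0 false t2
        · -- plain consonant: vowel run flushes, consonant run extends
          have hvo : ¬ (x ∈ pvVowels ∨ x = '?') := by
            intro h; rcases h with h' | h' <;> [exact hv h'; exact hq h']
          have hcA : (x ∉ pvVowels ∨ x = '?') ∧ x ≠ '-' := ⟨Or.inl hv, hd⟩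
          have hcB : x ∉ pvVowels ∧ x ≠ '-' := ⟨hv, hd⟩
          simp only [pvLoopB, pvLoop1', pvLoop2', List.cons_append, if_neg hvo, if_pos hcA, if_pos hcB]
          by_cases hv3 : vlen = 3
          · rw [if_pos hv3, if_pos hv3]
            cases vq with
            | false =>
              rw [if_neg (show ¬(false = true) by decide), if_neg (show ¬(false = true) by decide)]
              unfold pvRel
              rfl
            | true =>
              rw [if_pos rfl, if_pos rfl]
              exact pvFuse rest 0 false true (clen + 1) (cq || decide (x = '?')) t2
          · rw [if_neg hv3, if_neg hv3]
            exact pvFuse rest 0 false t1 (clen + 1) (cq || decide (x = '?')) t2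

-- A's classification of the pair (tmp1, tmp2) equals B's
theorem pvFinal_eq (a b : Bool) :
    (if a && b then "bad" else if (!a && b) || (!b && a) then "mixed" else "good")
    = (if a && b then "bad" else if a != b then "mixed" else "good") := by
  cases a <;> cases b <;> rfl

-- ===== VERDICT (by name: the statement is the Claim_ definition above) =====
theorem classifyStrings_spec : Claim_equal_classifyStrings := by
  intro s _
  unfold Spec_classifyStrings classifyStrings classifyStrings_alt
  by_cases h1 : s.toList.length = 1
  · simp [h1]
  · simp only [h1, if_false]
    have ha := pvLoop1_abs (s.toList ++ ['-']) [] false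
    have hb := pvLoop2_abs (s.toList ++ ['-']) [] false
    simp only [List.length_nil, List.not_mem_nil, decide_false] at ha hb
    rw [ha, hb]
    have h := pvFuse s.toList 0 false false 0 false false
    cases hr1 : pvLoop1' (s.toList ++ ['-']) 0 false false with
    | none =>
      cases hr2 : pvLoop2' (s.toList ++ ['-']) 0 false false <;>
        rw [hr1, hr2] at h <;> simp only [pvRel] at h <;> rw [h]
    | some a =>
      cases hr2 : pvLoop2' (s.toList ++ ['-']) 0 false false with
      | none => rw [hr1, hr2] at h; simp only [pvRel] at h; rw [h]
      | some b =>
        rw [hr1, hr2] at h; simp only [pvRel] at h; rw [h]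
        exact pvFinal_eq a b
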